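-- pv_equiv track=rewrite | github.com/jdpgrailsdev/advent_of_code_2021 | advent_of_code/puzzles/Puzzle08.py | __find_unique_count
-- ===== SOURCE A (Python) =====
-- def __find_unique_count(value):
--     total = 0
--
--     for v in value.split(" "):
--         unique_count = len(set(v))
--         if (
--             unique_count == 2
--             or unique_count == 3
--             or unique_count == 4
--             or unique_count == 7
--         ):
--             total += 1
--
--     return total
-- ===== SOURCE B (Python) =====
-- def __find_unique_count(value):
--     total = 0
--     seen = set()
--     for ch in value:
--         if ch == " ":
--             if len(seen) in (2, 3, 4, 7):
--                 total += 1
--             seen = set()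
--         else:
--             seen.add(ch)
--     if len(seen) in (2, 3, 4, 7):
--         total += 1
--     return total
-- ===== Notes on version B (the rewrite author's own statement) =====
-- stated objective: alternative
-- what changed: B never splits the string: it makes a single character-level scan that maintains the current token's set of distinct characters incrementally, flushing it into the total at each space and at the end, instead of A's split-then-per-token-set loop.
import Mathlib
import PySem

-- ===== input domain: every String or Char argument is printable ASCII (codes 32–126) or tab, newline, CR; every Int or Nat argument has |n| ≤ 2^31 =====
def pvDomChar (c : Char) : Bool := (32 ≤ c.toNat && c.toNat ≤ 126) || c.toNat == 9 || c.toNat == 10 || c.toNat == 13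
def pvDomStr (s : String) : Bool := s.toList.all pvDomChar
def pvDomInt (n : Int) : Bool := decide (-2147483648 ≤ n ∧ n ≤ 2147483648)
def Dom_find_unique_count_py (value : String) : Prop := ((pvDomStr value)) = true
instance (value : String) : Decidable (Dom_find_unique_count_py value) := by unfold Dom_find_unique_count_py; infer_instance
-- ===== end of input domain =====

-- B makes a single character-level scan maintaining the current token's distinct-character set,
-- flushing it at each space and at the end, instead of A's split-then-per-token loop (alternative, same cost).


-- ===== PORT A =====
def find_unique_count_py (value : String) : Int :=
  -- value.split(" "): sep is nonempty, so split? is always some; .getD [] is exact here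
  ((PySem.Str.split? value " ").getD []).foldl
    (fun total v =>
      let unique_count : Int := PySem.Set.len (PySem.Set.ofList v.toList)
      if unique_count == 2 || unique_count == 3 || unique_count == 4 || unique_count == 7
      then total + 1 else total) 0

-- ===== PORT B =====
def find_unique_count_py_alt (value : String) : Int :=
  let p : Int × PySem.Set Char :=
    value.toList.foldl
      (fun (st : Int × PySem.Set Char) ch =>
        if ch == ' ' then
          ((if PySem.Set.len st.2 == 2 || PySem.Set.len st.2 == 3 ||
               PySem.Set.len st.2 == 4 || PySem.Set.len st.2 == 7
            then st.1 + 1 else st.1), PySem.Set.empty)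
        else (st.1, PySem.Set.add st.2 ch))
      (0, PySem.Set.empty)
  if PySem.Set.len p.2 == 2 || PySem.Set.len p.2 == 3 ||
     PySem.Set.len p.2 == 4 || PySem.Set.len p.2 == 7
  then p.1 + 1 else p.1

-- ===== PRECONDITION & SPEC =====
def Spec_find_unique_count_py (value : String) (out : Int) : Prop := out = find_unique_count_py_alt value
instance (value : String) (out : Int) : Decidable (Spec_find_unique_count_py value out) := by unfold Spec_find_unique_count_py; infer_instance

-- ===== CLAIM (what is proved, stated in full; the proofs are below) =====
def Claim_equal_find_unique_count_py : Prop := ∀ (value : String), Dom_find_unique_count_py value → Spec_find_unique_count_py value (find_unique_count_py value)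

-- ===== LEMMAS AND PROOFS =====

-- A's per-token step, on char lists
def pvStepA (t : Int) (v : List Char) : Int :=
  if PySem.Set.len (PySem.Set.ofList v) == 2 || PySem.Set.len (PySem.Set.ofList v) == 3 ||
     PySem.Set.len (PySem.Set.ofList v) == 4 || PySem.Set.len (PySem.Set.ofList v) == 7
  then t + 1 else t

-- B's char step
def pvStepB (st : Int × PySem.Set Char) (ch : Char) : Int × PySem.Set Char :=
  if ch == ' ' then
    ((if PySem.Set.len st.2 == 2 || PySem.Set.len st.2 == 3 ||
         PySem.Set.len st.2 == 4 || PySem.Set.len st.2 == 7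
      then st.1 + 1 else st.1), PySem.Set.empty)
  else (st.1, PySem.Set.add st.2 ch)

def pvFlush (st : Int × PySem.Set Char) : Int :=
  if PySem.Set.len st.2 == 2 || PySem.Set.len st.2 == 3 ||
     PySem.Set.len st.2 == 4 || PySem.Set.len st.2 == 7
  then st.1 + 1 else st.1

theorem pvFlush_ofList (t : Int) (v : List Char) : pvFlush (t, PySem.Set.ofList v) = pvStepA t v := by
  simp [pvFlush, pvStepA]

theorem pvOfList_append_one (xs : List Char) (c : Char) :
    PySem.Set.ofList (xs ++ [c]) = PySem.Set.add (PySem.Set.ofList xs) c := by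
  simp [PySem.Set.ofList_eq_foldl]

-- character scan ≡ splitOn.go fold, for sep = [' ']
theorem pv_go_scan (fuel : Nat) (l cur : List Char) (acc : List (List Char)) (t : Int)
    (h : l.length ≤ fuel) :
    (PySem.Chars.splitOn.go [' '] fuel l cur acc).foldl pvStepA t
      = pvFlush (l.foldl pvStepB (acc.reverse.foldl pvStepA t, PySem.Set.ofList cur.reverse)) := by
  induction fuel generalizing l cur acc t with
  | zero =>
    interval_cases hl : l.length
    · have : l = [] := List.length_eq_zero_iff.mp hl
      subst this
      simp [PySem.Chars.splitOn.go, pvFlush_ofList, List.foldl_append]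
  | succ fuel ih =>
    cases l with
    | nil =>
      simp [PySem.Chars.splitOn.go, pvFlush_ofList, List.foldl_append]
    | cons c rest =>
      by_cases hc : c = ' '
      · subst hc
        rw [show PySem.Chars.splitOn.go [' '] (fuel+1) (' '::rest) cur acc
              = PySem.Chars.splitOn.go [' '] fuel rest [] (cur.reverse :: acc) by
            simp [PySem.Chars.splitOn.go, List.isPrefixOf]]
        rw [ih rest [] (cur.reverse :: acc) t (by simpa using Nat.le_of_succ_le_succ h)]
        simp [List.foldl_append, pvStepA, pvStepB, pvFlush, PySem.Set.empty]
      · rw [show PySem.Chars.splitOn.go [' '] (fuel+1) (c::rest) cur acc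
              = PySem.Chars.splitOn.go [' '] fuel rest (c :: cur) acc by
            simp [PySem.Chars.splitOn.go, List.isPrefixOf]
            intro h'; exact absurd h'.symm hc]
        rw [ih rest (c :: cur) acc t (by simpa using Nat.le_of_succ_le_succ h)]
        simp [pvStepB, hc, pvOfList_append_one]

-- ===== VERDICT (by name: the statement is the Claim_ definition above) =====
theorem pv_foldA_strings (l : List (List Char)) (t : Int) :
    List.foldl
      (fun (total : Int) (v : String) =>
        let unique_count : Int := PySem.Set.len (PySem.Set.ofList v.toList)
        if unique_count == 2 || unique_count == 3 || unique_count == 4 || unique_count == 7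
        then total + 1 else total) t (l.map String.ofList)
      = List.foldl pvStepA t l := by
  rw [List.foldl_map]
  congr 1
  funext t v
  simp [pvStepA]

theorem find_unique_count_py_spec : Claim_equal_find_unique_count_py := by
  intro value _
  unfold Spec_find_unique_count_py find_unique_count_py find_unique_count_py_alt
  have h1 : (" " : String).toList = [' '] := rfl
  have hsplit : (PySem.Str.split? value " ").getD []
      = (PySem.Chars.splitOn.go [' '] (value.toList.length + 1) value.toList [] []).map
          String.ofList := by
    simp [PySem.Str.split?, PySem.Chars.split?, PySem.Chars.splitOn, h1]
  rw [hsplit, pv_foldA_strings, pv_go_scan (value.toList.length + 1) value.toList [] [] 0 (by omega)]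
  rfl
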